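-- pv_equiv track=rewrite | github.com/LALITHA-14/codemind-python | Find_Most_Frequent_Vowel_and_Consonant_LeetCode.py | maxFreqSum
-- ===== SOURCE A (Python) =====
-- from collections import Counter
--
-- def maxFreqSum(s: str) -> int:
--     freq=Counter(s)
--     vowels=set("aeiou")
--     max_vo=0
--     max_co=0
--     for ch,count in freq.items():
--         if ch in vowels:
--             max_vo=max(count,max_vo)
--         else:
--             max_co=max(count,max_co)
--     return max_vo+max_co
-- ===== SOURCE B (Python) =====
-- def maxFreqSum(s: str) -> int:
--     t = sorted(s)
--     n = len(t)
--     max_vo = 0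
--     max_co = 0
--     i = 0
--     while i < n:
--         j = i
--         while j < n and t[j] == t[i]:
--             j += 1
--         run = j - i
--         if t[i] in "aeiou":
--             max_vo = max(max_vo, run)
--         else:
--             max_co = max(max_co, run)
--         i = j
--     return max_vo + max_co
-- ===== Notes on version B (the rewrite author's own statement) =====
-- stated objective: alternative
-- what changed: Replaces the Counter hash table and the loop over its items with sort-then-scan: sort the characters, then one linear pass over the sorted list measuring run lengths, taking the max vowel run and max consonant run.
import Mathlib
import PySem

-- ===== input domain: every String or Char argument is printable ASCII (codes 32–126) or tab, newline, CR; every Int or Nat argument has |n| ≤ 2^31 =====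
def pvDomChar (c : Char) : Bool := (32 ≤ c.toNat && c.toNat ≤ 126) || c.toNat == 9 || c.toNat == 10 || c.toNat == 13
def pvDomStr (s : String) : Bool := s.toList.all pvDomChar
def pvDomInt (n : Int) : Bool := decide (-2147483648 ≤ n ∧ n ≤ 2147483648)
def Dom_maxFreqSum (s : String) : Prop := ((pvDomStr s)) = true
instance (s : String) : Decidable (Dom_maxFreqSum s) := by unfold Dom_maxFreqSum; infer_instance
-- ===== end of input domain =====

-- B replaces the Counter table with sort-then-scan: sort the characters, then one pass over
-- the sorted list measuring run lengths, keeping the max vowel run and max consonant run.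


-- ===== PORT A =====
def maxFreqSum (s : String) : Int :=
  let freq := PySem.Dict.counter s.toList
  let vowels : PySem.Set Char := PySem.Set.ofList "aeiou".toList
  let p := freq.items.foldl
    (fun (acc : Int × Int) (kv : Char × Int) =>
      if kv.1 ∈ vowels then (max kv.2 acc.1, acc.2) else (acc.1, max kv.2 acc.2))
    (0, 0)
  p.1 + p.2

-- ===== PORT B =====
-- the inner `while j < n and t[j] == t[i]` run measurement is the takeWhile length;
-- advancing i to j is the dropWhile; the outer while-loop is the recursion.
def pvScan (t : List Char) (mv mc : Int) : Int × Int :=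
  match t with
  | [] => (mv, mc)
  | c :: rest =>
    if c ∈ (['a','e','i','o','u'] : List Char) then
      pvScan (rest.dropWhile (fun x => x == c))
        (max mv (1 + ((rest.takeWhile (fun x => x == c)).length : Int))) mc
    else
      pvScan (rest.dropWhile (fun x => x == c)) mv
        (max mc (1 + ((rest.takeWhile (fun x => x == c)).length : Int)))
termination_by t.length
decreasing_by all_goals
  exact Nat.lt_succ_of_le ((List.dropWhile_sublist _).length_le)

def maxFreqSum_alt (s : String) : Int :=
  let t := PySem.List.sorted s.toList (fun c => c) false
  let p := pvScan t 0 0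
  p.1 + p.2

-- ===== PRECONDITION & SPEC =====
def Spec_maxFreqSum (s : String) (out : Int) : Prop := out = maxFreqSum_alt s
instance (s : String) (out : Int) : Decidable (Spec_maxFreqSum s out) := by unfold Spec_maxFreqSum; infer_instance

-- ===== CLAIM (what is proved, stated in full; the proofs are below) =====
def Claim_equal_maxFreqSum : Prop := ∀ (s : String), Dom_maxFreqSum s → Spec_maxFreqSum s (maxFreqSum s)

-- ===== LEMMAS AND PROOFS =====

-- A's loop over the counter items, split into the two accumulators.
theorem pvFoldSplit (p : Char → Prop) [DecidablePred p] (f : Char → Int) :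
    ∀ (ks : List Char) (a b : Int),
      ks.foldl (fun (acc : Int × Int) k =>
          if p k then (max (f k) acc.1, acc.2) else (acc.1, max (f k) acc.2)) (a, b)
        = ((ks.filter (fun k => decide (p k))).foldl (fun a k => max (f k) a) a,
           (ks.filter (fun k => !decide (p k))).foldl (fun b k => max (f k) b) b) := by
  intro ks
  induction ks with
  | nil => intro a b; simp
  | cons x t ih =>
    intro a b
    by_cases h : p x <;> simp [h, ih]

-- bound characterisation of A's running max
theorem pvFoldMax_le (f : Char → Int) :
    ∀ (ks : List Char) (a m : Int),
      ks.foldl (fun a k => max (f k) a) a ≤ m ↔ a ≤ m ∧ ∀ k ∈ ks, f k ≤ m := by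
  intro ks
  induction ks with
  | nil => intro a m; simp
  | cons x t ih =>
    intro a m
    rw [List.foldl_cons, ih]
    constructor
    · rintro ⟨h1, h2⟩
      refine ⟨le_trans (le_max_right _ _) h1, fun k hk => ?_⟩
      rcases List.mem_cons.mp hk with hk | hk
      · exact hk ▸ le_trans (le_max_left _ _) h1
      · exact h2 k hk
    · rintro ⟨h1, h2⟩
      exact ⟨max_le (h2 x (by simp)) h1, fun k hk => h2 k (by simp [hk])⟩

-- in a sorted run, after dropping the leading block of c's, c does not recur
theorem pvNotMem_dropWhile (c : Char) :
    ∀ (rest : List Char), (c :: rest).Pairwise (· ≤ ·) →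
      c ∉ rest.dropWhile (fun y => y == c) := by
  intro rest
  induction rest with
  | nil => intro _ h; simp at h
  | cons x xs ih =>
    intro hp
    by_cases hx : (x == c) = true
    · rw [List.dropWhile_cons, if_pos hx]
      exact ih (hp.sublist (by simp))
    · rw [List.dropWhile_cons, if_neg hx]
      intro hmem
      have hcx : c ≤ x := (List.pairwise_cons.mp hp).1 x (by simp)
      rcases List.mem_cons.mp hmem with h | h
      · exact hx (by simp [h])
      · have hxc : x ≤ c :=
          ((List.pairwise_cons.mp (List.pairwise_cons.mp hp).2).1) c h
        have : x = c := le_antisymm hxc hcx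
        exact hx (by simp [this])

-- membership in a sorted run splits into head and remainder
theorem pvMem_run (c : Char) (rest : List Char) (x : Char) :
    x ∈ c :: rest ↔ x = c ∨ x ∈ rest.dropWhile (fun y => y == c) := by
  constructor
  · intro hx
    rcases List.mem_cons.mp hx with h | h
    · exact Or.inl h
    · rw [← List.takeWhile_append_dropWhile (p := fun y => y == c) (l := rest)] at h
      rcases List.mem_append.mp h with h | h
      · exact Or.inl (by simpa using List.mem_takeWhile_imp h)
      · exact Or.inr h
  · rintro (h | h)
    · simp [h]
    · exact List.mem_cons_of_mem _ ((List.dropWhile_sublist _).mem h)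

-- the run length at the head of a sorted list is the head's full count
theorem pvRun_count (c : Char) (rest : List Char) (hp : (c :: rest).Pairwise (· ≤ ·)) :
    (c :: rest).count c = 1 + (rest.takeWhile (fun x => x == c)).length := by
  have hsplit := List.takeWhile_append_dropWhile (p := fun y => y == c) (l := rest)
  have htk : (rest.takeWhile (fun x => x == c)).count c
      = (rest.takeWhile (fun x => x == c)).length := by
    apply List.count_eq_length.mpr
    intro b hb
    have hb' : (b == c) = true := List.mem_takeWhile_imp (p := fun x => x == c) hb
    have : b = c := beq_iff_eq.mp hb'
    simp [this]
  have hdw : (rest.dropWhile (fun x => x == c)).count c = 0 :=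
    List.count_eq_zero.mpr (pvNotMem_dropWhile c rest hp)
  calc (c :: rest).count c = rest.count c + 1 := List.count_cons_self
    _ = ((rest.takeWhile (fun x => x == c)) ++ (rest.dropWhile (fun x => x == c))).count c + 1 := by
        rw [hsplit]
    _ = 1 + (rest.takeWhile (fun x => x == c)).length := by
        rw [List.count_append, htk, hdw]; omega

-- counts of the surviving characters are unchanged by dropping the head run
theorem pvCount_rest (c : Char) (rest : List Char) (hp : (c :: rest).Pairwise (· ≤ ·))
    (d : Char) (hd : d ∈ rest.dropWhile (fun y => y == c)) :
    (c :: rest).count d = (rest.dropWhile (fun y => y == c)).count d := by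
  have hdc : d ≠ c := fun h => pvNotMem_dropWhile c rest hp (h ▸ hd)
  have hsplit := List.takeWhile_append_dropWhile (p := fun y => y == c) (l := rest)
  have htk : (rest.takeWhile (fun x => x == c)).count d = 0 := by
    apply List.count_eq_zero.mpr
    intro hmem
    exact hdc (by simpa using List.mem_takeWhile_imp hmem)
  calc (c :: rest).count d = rest.count d := List.count_cons_of_ne (Ne.symm hdc)
    _ = ((rest.takeWhile (fun x => x == c)) ++ (rest.dropWhile (fun x => x == c))).count d := by
        rw [hsplit]
    _ = (rest.dropWhile (fun y => y == c)).count d := by rw [List.count_append, htk]; omega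

-- bound characterisation of B's scan, both accumulators at once
theorem pvScan_le (m1 m2 : Int) :
    ∀ (n : Nat) (t : List Char), t.length ≤ n → t.Pairwise (· ≤ ·) → ∀ (mv mc : Int),
      ((pvScan t mv mc).1 ≤ m1 ↔
        mv ≤ m1 ∧ ∀ c ∈ t, c ∈ (['a','e','i','o','u'] : List Char) → ((t.count c : Int) ≤ m1)) ∧
      ((pvScan t mv mc).2 ≤ m2 ↔
        mc ≤ m2 ∧ ∀ c ∈ t, c ∉ (['a','e','i','o','u'] : List Char) → ((t.count c : Int) ≤ m2)) := by
  intro n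
  induction n with
  | zero =>
    intro t ht _ mv mc
    have : t = [] := List.length_eq_zero_iff.mp (Nat.le_zero.mp ht)
    subst this
    simp [pvScan]
  | succ n ih =>
    intro t ht hp mv mc
    match t with
    | [] => simp [pvScan]
    | c :: rest =>
      have hlen : (rest.dropWhile (fun x => x == c)).length ≤ n := by
        have := (List.dropWhile_sublist (l := rest) (p := fun x => x == c)).length_le
        simp only [List.length_cons] at ht; omega
      have hp' : (rest.dropWhile (fun x => x == c)).Pairwise (· ≤ ·) :=
        (List.pairwise_cons.mp hp).2.sublist (List.dropWhile_sublist _)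
      have hrun : (1 + ((rest.takeWhile (fun x => x == c)).length : Int))
          = ((c :: rest).count c : Int) := by
        rw [pvRun_count c rest hp]; push_cast; ring
      have hmemsplit := pvMem_run c rest
      have hcount := pvCount_rest c rest hp
      have hcnotin := pvNotMem_dropWhile c rest hp
      by_cases hv : c ∈ (['a','e','i','o','u'] : List Char)
      · rw [show pvScan (c :: rest) mv mc
            = pvScan (rest.dropWhile (fun x => x == c))
                (max mv (1 + ((rest.takeWhile (fun x => x == c)).length : Int))) mc
            from by rw [pvScan]; simp [hv]]
        obtain ⟨ih1, ih2⟩ := ih _ hlen hp' (max mv (1 + ((rest.takeWhile (fun x => x == c)).length : Int))) mc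
        constructor
        · rw [ih1, max_le_iff, hrun]
          constructor
          · rintro ⟨⟨h1, h2⟩, h3⟩
            refine ⟨h1, fun d hd hdv => ?_⟩
            rcases (hmemsplit d).mp hd with h | h
            · subst h; exact h2
            · rw [hcount d h]; exact h3 d h hdv
          · rintro ⟨h1, h2⟩
            refine ⟨⟨h1, h2 c (by simp) hv⟩, fun d hd hdv => ?_⟩
            rw [← hcount d hd]
            exact h2 d ((hmemsplit d).mpr (Or.inr hd)) hdv
        · rw [ih2]
          constructor
          · rintro ⟨h1, h2⟩
            refine ⟨h1, fun d hd hdv => ?_⟩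
            rcases (hmemsplit d).mp hd with h | h
            · exact absurd hv (h ▸ hdv)
            · rw [hcount d h]; exact h2 d h hdv
          · rintro ⟨h1, h2⟩
            refine ⟨h1, fun d hd hdv => ?_⟩
            rw [← hcount d hd]
            exact h2 d ((hmemsplit d).mpr (Or.inr hd)) hdv
      · rw [show pvScan (c :: rest) mv mc
            = pvScan (rest.dropWhile (fun x => x == c)) mv
                (max mc (1 + ((rest.takeWhile (fun x => x == c)).length : Int)))
            from by rw [pvScan]; simp [hv]]
        obtain ⟨ih1, ih2⟩ := ih _ hlen hp' mv (max mc (1 + ((rest.takeWhile (fun x => x == c)).length : Int)))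
        constructor
        · rw [ih1]
          constructor
          · rintro ⟨h1, h2⟩
            refine ⟨h1, fun d hd hdv => ?_⟩
            rcases (hmemsplit d).mp hd with h | h
            · exact absurd hdv (h ▸ hv)
            · rw [hcount d h]; exact h2 d h hdv
          · rintro ⟨h1, h2⟩
            refine ⟨h1, fun d hd hdv => ?_⟩
            rw [← hcount d hd]
            exact h2 d ((hmemsplit d).mpr (Or.inr hd)) hdv
        · rw [ih2, max_le_iff, hrun]
          constructor
          · rintro ⟨⟨h1, h2⟩, h3⟩
            refine ⟨h1, fun d hd hdv => ?_⟩
            rcases (hmemsplit d).mp hd with h | h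
            · subst h; exact h2
            · rw [hcount d h]; exact h3 d h hdv
          · rintro ⟨h1, h2⟩
            refine ⟨⟨h1, h2 c (by simp) hv⟩, fun d hd hdv => ?_⟩
            rw [← hcount d hd]
            exact h2 d ((hmemsplit d).mpr (Or.inr hd)) hdv

-- ===== VERDICT (by name: the statement is the Claim_ definition above) =====
theorem maxFreqSum_spec : Claim_equal_maxFreqSum := by
  intro s _
  unfold Spec_maxFreqSum maxFreqSum maxFreqSum_alt
  dsimp only
  set l := s.toList with hl
  set t := PySem.List.sorted l (fun c => c) false with hts
  have hperm : t.Perm l := PySem.List.sorted_perm l _ false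
  have hpw : t.Pairwise (· ≤ ·) := by
    have := PySem.List.sorted_pairwise (xs := l) (key := fun c : Char => c)
    simpa using this
  have hvs : (PySem.Set.ofList "aeiou".toList : PySem.Set Char) = (['a','e','i','o','u'] : List Char) := by decide
  rw [PySem.Dict.items_counter, List.foldl_map, hvs]
  dsimp only
  rw [pvFoldSplit (fun k => k ∈ (['a','e','i','o','u'] : List Char)) (fun k => (l.count k : Int))]
  set f : Char → Int := fun k => (l.count k : Int) with hf
  set ksv := ((PySem.Set.ofList l : List Char).filter
      (fun k => decide (k ∈ (['a','e','i','o','u'] : List Char)))) with hksv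
  set ksc := ((PySem.Set.ofList l : List Char).filter
      (fun k => !decide (k ∈ (['a','e','i','o','u'] : List Char)))) with hksc
  set va := ksv.foldl (fun a k => max (f k) a) (0 : Int) with hva
  set vc := ksc.foldl (fun b k => max (f k) b) (0 : Int) with hvc
  set B := pvScan t 0 0 with hB
  have hchar := pvScan_le B.1 B.2 t.length t le_rfl hpw 0 0
  have hB1 := (hchar.1.mp le_rfl)
  have hB2 := (hchar.2.mp le_rfl)
  have hva1 := (pvFoldMax_le f ksv 0 va).mp le_rfl
  have hvc1 := (pvFoldMax_le f ksc 0 vc).mp le_rfl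
  have hcnt : ∀ c : Char, t.count c = l.count c := fun c => hperm.count_eq c
  have h1 : va = B.1 := by
    apply le_antisymm
    · rw [pvFoldMax_le]
      refine ⟨hB1.1, fun k hk => ?_⟩
      have hk' := List.mem_filter.mp hk
      have hkl : k ∈ l := by simpa [PySem.Set.mem_ofList] using hk'.1
      have hkt : k ∈ t := hperm.mem_iff.mpr hkl
      have := hB1.2 k hkt (by simpa using hk'.2)
      simpa [hf, hcnt k] using this
    · exact ((pvScan_le va B.2 t.length t le_rfl hpw 0 0).1.mpr
        ⟨hva1.1, fun c hc hcv => by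
          have hcl : c ∈ l := hperm.mem_iff.mp hc
          have hmem : c ∈ ksv := List.mem_filter.mpr
            ⟨by simpa [PySem.Set.mem_ofList] using hcl, by simpa using hcv⟩
          have := hva1.2 c hmem
          simpa [hf, hcnt c] using this⟩)
  have h2 : vc = B.2 := by
    apply le_antisymm
    · rw [pvFoldMax_le]
      refine ⟨hB2.1, fun k hk => ?_⟩
      have hk' := List.mem_filter.mp hk
      have hkl : k ∈ l := by simpa [PySem.Set.mem_ofList] using hk'.1
      have hkt : k ∈ t := hperm.mem_iff.mpr hkl
      have hknv : k ∉ (['a','e','i','o','u'] : List Char) := by simpa using hk'.2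
      have := hB2.2 k hkt hknv
      simpa [hf, hcnt k] using this
    · exact ((pvScan_le B.1 vc t.length t le_rfl hpw 0 0).2.mpr
        ⟨hvc1.1, fun c hc hcv => by
          have hcl : c ∈ l := hperm.mem_iff.mp hc
          have hmem : c ∈ ksc := List.mem_filter.mpr
            ⟨by simpa [PySem.Set.mem_ofList] using hcl, by simpa using hcv⟩
          have := hvc1.2 c hmem
          simpa [hf, hcnt c] using this⟩)
  rw [h1, h2]
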